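-- pv_equiv track=rewrite | github.com/zsolt-szabo/pge-graph | graph_pge.py | _get_weekdays
-- ===== SOURCE A (Python) =====
-- import copy
--
-- weekdays = ["Mon", "Tue", "Wed", "Thu", "Fri", "Sat", "Sun"]
--
-- def _get_weekdays(plotable):
--     # If dataset is small, it is possible we will miss weekdays so remove
--     wkdays = copy.copy(weekdays)
--     deletes = []
--     for i, day in enumerate(weekdays):
--         if day not in plotable:
--             deletes.append(i)
--     deletes.reverse()
--     for i in deletes:
--         del wkdays[i]
--     return wkdays
-- ===== SOURCE B (Python) =====
-- weekdays = ["Mon", "Tue", "Wed", "Thu", "Fri", "Sat", "Sun"]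
--
-- def _get_weekdays(plotable):
--     # Single forward pass: keep each weekday that appears in plotable,
--     # instead of collecting delete-indices and deleting them in reverse.
--     return [day for day in weekdays if day in plotable]
-- ===== Notes on version B (the rewrite author's own statement) =====
-- stated objective: simpler
-- what changed: Replaces A's copy/collect-delete-indices/reverse/delete-by-index structure with a single forward selection pass that keeps weekdays present in plotable.
import Mathlib
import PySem

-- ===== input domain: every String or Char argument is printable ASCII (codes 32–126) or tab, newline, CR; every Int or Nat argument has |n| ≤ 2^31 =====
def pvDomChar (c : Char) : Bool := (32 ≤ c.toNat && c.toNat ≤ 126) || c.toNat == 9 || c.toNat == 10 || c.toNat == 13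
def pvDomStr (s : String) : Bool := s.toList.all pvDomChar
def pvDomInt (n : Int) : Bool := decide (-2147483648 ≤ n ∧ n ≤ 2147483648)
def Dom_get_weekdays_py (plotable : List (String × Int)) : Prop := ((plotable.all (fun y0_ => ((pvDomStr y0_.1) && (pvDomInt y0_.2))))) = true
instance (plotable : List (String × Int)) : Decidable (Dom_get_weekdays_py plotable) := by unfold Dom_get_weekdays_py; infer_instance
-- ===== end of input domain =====

set_option maxHeartbeats 1000000


-- ===== PORT A =====
-- B changes: single forward selection pass instead of A's collect-delete-indices/reverse/delete (objective: simpler).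
-- `day in plotable` is Python dict-key membership, ported as PySem.Dict.contains on the association list.
def pvWeekdays : List String := ["Mon", "Tue", "Wed", "Thu", "Fri", "Sat", "Sun"]

def pvInKeys (plotable : List (String × Int)) (day : String) : Bool :=
  PySem.Dict.contains (PySem.Dict.mk plotable) day

-- del wkdays[i]: here i is always a valid nonnegative index (collected from enumerate of the same
-- list the deletions shrink towards, removed back-to-front), so pop? never fails; getD is unreachable.
def pvDelIdx (wkdays : List String) (i : Int) : List String :=
  ((PySem.List.pop? wkdays i).map Prod.snd).getD wkdays

def get_weekdays_py (plotable : List (String × Int)) : List String :=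
  let wkdays := pvWeekdays
  let deletes : List Int :=
    (PySem.List.enumerate pvWeekdays 0).foldl
      (fun deletes p => if ¬ (pvInKeys plotable p.2) then deletes ++ [p.1] else deletes) []
  let deletes := deletes.reverse
  deletes.foldl (fun wkdays i => pvDelIdx wkdays i) wkdays

-- ===== PORT B =====
def get_weekdays_py_alt (plotable : List (String × Int)) : List String :=
  pvWeekdays.filter (fun day => pvInKeys plotable day)

-- ===== PRECONDITION & SPEC =====
def Spec_get_weekdays_py (plotable : List (String × Int)) (out : List String) : Prop := out = get_weekdays_py_alt plotable
instance (plotable : List (String × Int)) (out : List String) : Decidable (Spec_get_weekdays_py plotable out) := by unfold Spec_get_weekdays_py; infer_instance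

-- ===== CLAIM (what is proved, stated in full; the proofs are below) =====
def Claim_equal_get_weekdays_py : Prop := ∀ (plotable : List (String × Int)), Dom_get_weekdays_py plotable → Spec_get_weekdays_py plotable (get_weekdays_py plotable)

-- ===== LEMMAS AND PROOFS =====

-- Both sides depend on plotable only through the membership booleans of the 7 fixed weekdays;
-- abstract the membership test and decide all 128 boolean cases.
theorem pv_key (m : String → Bool) :
    ((PySem.List.enumerate pvWeekdays 0).foldl
        (fun ds p => if ¬ (m p.2) then ds ++ [p.1] else ds) []).reverse.foldl
        (fun w i => pvDelIdx w i) pvWeekdays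
      = pvWeekdays.filter (fun day => m day) := by
  cases h0 : m "Mon" <;> cases h1 : m "Tue" <;> cases h2 : m "Wed" <;> cases h3 : m "Thu" <;>
    cases h4 : m "Fri" <;> cases h5 : m "Sat" <;> cases h6 : m "Sun" <;>
    simp only [pvWeekdays, PySem.List.enumerate_cons, PySem.List.enumerate_nil,
      List.foldl_cons, List.foldl_nil, h0, h1, h2, h3, h4, h5, h6, List.filter,
      not_true, not_false_iff, Bool.false_eq_true, ite_true, ite_false] <;> rfl

theorem pv_eq (plotable : List (String × Int)) :
    get_weekdays_py plotable = get_weekdays_py_alt plotable := by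
  simpa [get_weekdays_py, get_weekdays_py_alt] using pv_key (fun day => pvInKeys plotable day)

-- ===== VERDICT (by name: the statement is the Claim_ definition above) =====
theorem get_weekdays_py_spec : Claim_equal_get_weekdays_py := by
  intro plotable _
  unfold Spec_get_weekdays_py
  exact pv_eq plotable
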